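-- pv_equiv track=rewrite | github.com/Will-X-Yuanyuan/Card-Player | phase_type.py | same_suit
-- ===== SOURCE A (Python) =====
-- def same_suit(group):
--     '''Takes a group and checks whether the cards have the same suit.
--     Returns True if yes, False otherwise.'''
--     # Set a test case for the suit, this test case cannot be wild
--     for value, suit in group:
--         if value == 'A':
--             continue
--         test_suit = suit
--
--     for value, suit in group:
--         if value != 'A' and suit != test_suit:
--             return False
--     return True
-- ===== SOURCE B (Python) =====
-- def same_suit(group):
--     '''Takes a group and checks whether the cards have the same suit.
--     Returns True if yes, False otherwise.'''
--     suits = {suit for value, suit in group if value != 'A'}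
--     return len(suits) <= 1
-- ===== Notes on version B (the rewrite author's own statement) =====
-- stated objective: simpler
-- what changed: B collects the distinct suits of non-wild cards into a set in one pass and returns len<=1, replacing A's two loops (reference-suit selection plus verification scan with early return).
import Mathlib
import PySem

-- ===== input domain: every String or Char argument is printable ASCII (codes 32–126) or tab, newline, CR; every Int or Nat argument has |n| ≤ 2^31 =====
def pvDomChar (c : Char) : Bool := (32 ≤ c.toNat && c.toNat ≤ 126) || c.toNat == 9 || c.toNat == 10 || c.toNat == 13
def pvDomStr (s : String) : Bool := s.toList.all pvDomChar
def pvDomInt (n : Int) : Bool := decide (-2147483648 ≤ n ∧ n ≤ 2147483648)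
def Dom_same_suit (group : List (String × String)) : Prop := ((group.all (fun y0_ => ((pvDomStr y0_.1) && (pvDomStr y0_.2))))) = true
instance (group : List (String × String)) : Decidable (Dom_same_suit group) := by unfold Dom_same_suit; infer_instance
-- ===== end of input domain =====

-- B replaces A's reference-suit selection loop plus verification scan by a one-pass
-- set of distinct non-wild suits and a len<=1 test (objective: simpler).

-- ===== PORT A =====
-- second for-loop of A: early return False on a non-wild card whose suit differs from
-- test_suit (test_suit is only compared when value != 'A', so Option is safe here)
def sameSuitCheck : List (String × String) → Option String → Bool
  | [], _ => true
  | (value, suit) :: rest, test_suit =>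
    if value ≠ "A" && !((some suit : Option String) == test_suit) then false
    else sameSuitCheck rest test_suit

def same_suit (group : List (String × String)) : Bool :=
  -- first for-loop: test_suit ends as the last non-wild suit (none if never assigned)
  let test_suit : Option String :=
    group.foldl (fun acc p => if p.1 = "A" then acc else some p.2) none
  sameSuitCheck group test_suit

-- ===== PORT B =====
def same_suit_alt (group : List (String × String)) : Bool :=
  let suits : PySem.Set String :=
    PySem.Set.ofList ((group.filter (fun p => p.1 ≠ "A")).map Prod.snd)
  PySem.Set.len suits ≤ 1

-- ===== PRECONDITION & SPEC =====
def Spec_same_suit (group : List (String × String)) (out : Bool) : Prop := out = same_suit_alt group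
instance (group : List (String × String)) (out : Bool) : Decidable (Spec_same_suit group out) := by unfold Spec_same_suit; infer_instance

-- ===== CLAIM (what is proved, stated in full; the proofs are below) =====
def Claim_equal_same_suit : Prop := ∀ (group : List (String × String)), Dom_same_suit group → Spec_same_suit group (same_suit group)

-- ===== LEMMAS AND PROOFS =====

-- the non-wild suits of the group, in order
def pvSuits (group : List (String × String)) : List String :=
  (group.filter (fun p => p.1 ≠ "A")).map Prod.snd

theorem sameSuitCheck_eq_all (l : List (String × String)) (t : Option String) :
    sameSuitCheck l t = l.all (fun p => p.1 == "A" || (some p.2 : Option String) == t) := by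
  induction l with
  | nil => rfl
  | cons p rest ih =>
    obtain ⟨v, s⟩ := p
    simp only [sameSuitCheck, List.all_cons, ih]
    by_cases hv : v = "A" <;> by_cases hs : (some s : Option String) = t <;>
      simp [hv, hs]

theorem foldl_pick (l : List (String × String)) (acc : Option String) :
    l.foldl (fun acc p => if p.1 = "A" then acc else some p.2) acc
      = match (pvSuits l).getLast? with
        | some x => some x
        | none => acc := by
  induction l generalizing acc with
  | nil => simp [pvSuits]
  | cons p rest ih =>
    obtain ⟨v, s⟩ := p
    by_cases hv : v = "A"
    · simp [pvSuits, hv, List.foldl_cons, ih acc]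
    · simp only [List.foldl_cons, if_neg hv]
      rw [ih (some s)]
      have hc : pvSuits ((v, s) :: rest) = s :: pvSuits rest := by
        simp [pvSuits, hv]
      rw [hc]
      cases hr : pvSuits rest with
      | nil => simp
      | cons b bs =>
        rw [List.getLast?_cons_cons]
        cases hbl : (b :: bs).getLast? with
        | none => simp at hbl
        | some y => rfl

-- all-equal characterisations
theorem mem_pvSuits (group : List (String × String)) (s : String) :
    s ∈ pvSuits group ↔ ∃ p ∈ group, p.1 ≠ "A" ∧ p.2 = s := by
  simp [pvSuits]

theorem same_suit_true_iff (group : List (String × String)) :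
    same_suit group = true ↔ ∀ s ∈ pvSuits group, ∀ s' ∈ pvSuits group, s = s' := by
  unfold same_suit
  rw [sameSuitCheck_eq_all, foldl_pick]
  cases hL : (pvSuits group).getLast? with
  | none =>
    have he : pvSuits group = [] := List.getLast?_eq_none_iff.mp hL
    constructor
    · intro _ s hs
      rw [he] at hs; cases hs
    · intro _
      rw [List.all_eq_true]
      intro p hp
      by_cases hpv : p.1 = "A"
      · simp [hpv]
      · exfalso
        have : p.2 ∈ pvSuits group := (mem_pvSuits group p.2).mpr ⟨p, hp, hpv, rfl⟩
        rw [he] at this; cases this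
  | some x =>
    have hx : x ∈ pvSuits group := List.mem_of_getLast? hL
    constructor
    · intro hall s hs s' hs'
      rw [List.all_eq_true] at hall
      obtain ⟨p, hp, hpv, rfl⟩ := (mem_pvSuits group s).mp hs
      obtain ⟨q, hq, hqv, rfl⟩ := (mem_pvSuits group s').mp hs'
      have h1 := hall p hp
      have h2 := hall q hq
      simp [hpv, hqv] at h1 h2
      rw [h1, h2]
    · intro hall
      rw [List.all_eq_true]
      intro p hp
      by_cases hpv : p.1 = "A"
      · simp [hpv]
      · have : p.2 ∈ pvSuits group := (mem_pvSuits group p.2).mpr ⟨p, hp, hpv, rfl⟩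
        have := hall p.2 this x hx
        simp [this]

theorem alt_true_iff (group : List (String × String)) :
    same_suit_alt group = true ↔ ∀ s ∈ pvSuits group, ∀ s' ∈ pvSuits group, s = s' := by
  unfold same_suit_alt
  show (decide (PySem.Set.len (PySem.Set.ofList (pvSuits group)) ≤ 1)) = true ↔ _
  rw [decide_eq_true_iff]
  have hmem : ∀ a : String, a ∈ PySem.Set.ofList (pvSuits group) ↔ a ∈ pvSuits group :=
    fun a => PySem.Set.mem_ofList ..
  constructor
  · intro hlen s hs s' hs'
    cases hset : PySem.Set.ofList (pvSuits group) with
    | nil =>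
      exfalso
      have := (hmem s).mpr hs
      rw [hset] at this; cases this
    | cons x xs =>
      have hxs : xs = [] := by
        have hl : PySem.Set.len (PySem.Set.ofList (pvSuits group)) = ((x :: xs).length : Int) := by
          rw [hset]; rfl
        rw [hl] at hlen
        simp at hlen
        exact hlen
      have h1 := (hmem s).mpr hs
      have h2 := (hmem s').mpr hs'
      rw [hset, hxs] at h1 h2
      simp at h1 h2
      rw [h1, h2]
  · intro hall
    by_cases hp : pvSuits group = []
    · rw [hp]
      decide
    · obtain ⟨x, hx⟩ := List.exists_mem_of_ne_nil _ hp
      have hsub : PySem.Set.ofList (pvSuits group) ⊆ [x] := by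
        intro a ha
        have := hall a ((hmem a).mp ha) x hx
        simp [this]
      have hnd : (PySem.Set.ofList (pvSuits group)).Nodup := PySem.Set.nodup_ofList ..
      have hle : (PySem.Set.ofList (pvSuits group)).length ≤ 1 :=
        (List.subperm_of_subset hnd hsub).length_le
      show ((PySem.Set.ofList (pvSuits group)).length : Int) ≤ 1
      exact_mod_cast hle

-- ===== VERDICT (by name: the statement is the Claim_ definition above) =====
theorem same_suit_spec : Claim_equal_same_suit := by
  intro group _
  unfold Spec_same_suit
  have h1 := same_suit_true_iff group
  have h2 := alt_true_iff group
  exact Bool.eq_iff_iff.mpr (h1.trans h2.symm)
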